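-- pv_equiv track=rewrite | github.com/deepakg932/Police-Surveillance-AI | backend/ai-python/main.py | canonicalize_detected_shoe_label
-- ===== SOURCE A (Python) =====
-- def canonicalize_detected_shoe_label(label: str):
--     s = (label or "").strip().lower()
--     if any(k in s for k in ["sandal", "flip", "flop", "slipper", "open toe", "chappal"]):
--         return "sandals"
--     if "boot" in s:
--         return "boots"
--     if any(k in s for k in ["sneaker", "athletic", "running", "sports"]):
--         return "sneakers"
--     if any(k in s for k in ["shoe", "footwear"]):
--         return "shoes"
--     return "shoes"
-- ===== SOURCE B (Python) =====
-- # Single left-to-right scan over the string: at each position try to match any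
-- # keyword (naive multi-pattern matching), keeping the best (lowest) category
-- # priority seen; the priority indexes the category name at the end.
-- _KW = [
--     ("sandal", 0), ("flip", 0), ("flop", 0), ("slipper", 0), ("open toe", 0), ("chappal", 0),
--     ("boot", 1),
--     ("sneaker", 2), ("athletic", 2), ("running", 2), ("sports", 2),
--     ("shoe", 3), ("footwear", 3),
-- ]
-- _NAMES = ["sandals", "boots", "sneakers", "shoes", "shoes"]
--
-- def canonicalize_detected_shoe_label(label: str):
--     s = (label or "").strip().lower()
--     best = 4
--     for i in range(len(s) + 1):
--         for kw, p in _KW: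
--             if p < best and s.startswith(kw, i):
--                 best = p
--     return _NAMES[best]
-- ===== Notes on version B (the rewrite author's own statement) =====
-- stated objective: alternative
-- what changed: Replaces A's four branches of per-keyword substring membership tests with a single position-by-position scan of the string that tries to match every keyword at each offset (naive multi-pattern matching) and keeps the minimum category priority, which indexes the category name at the end.
import Mathlib
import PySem

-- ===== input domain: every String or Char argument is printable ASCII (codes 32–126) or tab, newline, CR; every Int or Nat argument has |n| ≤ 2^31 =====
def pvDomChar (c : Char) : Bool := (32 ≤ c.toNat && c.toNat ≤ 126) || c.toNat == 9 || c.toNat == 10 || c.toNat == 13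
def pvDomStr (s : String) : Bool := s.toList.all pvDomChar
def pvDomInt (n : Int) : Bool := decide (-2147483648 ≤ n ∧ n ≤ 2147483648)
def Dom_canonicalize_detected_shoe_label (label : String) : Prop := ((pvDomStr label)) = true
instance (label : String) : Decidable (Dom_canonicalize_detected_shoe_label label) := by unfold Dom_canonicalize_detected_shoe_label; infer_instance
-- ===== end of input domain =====

-- B replaces A's four per-keyword substring-test branches with a single
-- position-by-position scan of the string (naive multi-pattern matching)
-- that keeps the minimum category priority; alternative algorithm, same cost.

-- ===== PORT A =====
def canonicalize_detected_shoe_label (label : String) : String :=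
  let s := PySem.Str.lower (PySem.Str.strip label)
  if ["sandal", "flip", "flop", "slipper", "open toe", "chappal"].any
      (fun k => PySem.Str.isIn k s) then "sandals"
  else if PySem.Str.isIn "boot" s then "boots"
  else if ["sneaker", "athletic", "running", "sports"].any
      (fun k => PySem.Str.isIn k s) then "sneakers"
  else if ["shoe", "footwear"].any (fun k => PySem.Str.isIn k s) then "shoes"
  else "shoes"

-- ===== PORT B =====
def pvKW : List (String × Nat) :=
  [("sandal", 0), ("flip", 0), ("flop", 0), ("slipper", 0), ("open toe", 0), ("chappal", 0),
   ("boot", 1),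
   ("sneaker", 2), ("athletic", 2), ("running", 2), ("sports", 2),
   ("shoe", 3), ("footwear", 3)]

def pvNames : List String := ["sandals", "boots", "sneakers", "shoes", "shoes"]

def canonicalize_detected_shoe_label_alt (label : String) : String :=
  let s := PySem.Str.lower (PySem.Str.strip label)
  let cs := s.toList
  -- s.startswith(kw, i) with 0 ≤ i ≤ len(s): exact as kw.toList <+: cs.drop i.toNat
  let best := (PySem.List.pyRange 0 ((cs.length : Int) + 1) 1).foldl
    (fun b i => pvKW.foldl
      (fun b e => if e.2 < b ∧ e.1.toList.isPrefixOf (cs.drop i.toNat) then e.2 else b) b) 4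
  pvNames.getD best "shoes"

-- ===== PRECONDITION & SPEC =====
def Spec_canonicalize_detected_shoe_label (label : String) (out : String) : Prop := out = canonicalize_detected_shoe_label_alt label
instance (label : String) (out : String) : Decidable (Spec_canonicalize_detected_shoe_label label out) := by unfold Spec_canonicalize_detected_shoe_label; infer_instance

-- ===== CLAIM (what is proved, stated in full; the proofs are below) =====
def Claim_equal_canonicalize_detected_shoe_label : Prop := ∀ (label : String), Dom_canonicalize_detected_shoe_label label → Spec_canonicalize_detected_shoe_label label (canonicalize_detected_shoe_label label)

-- ===== LEMMAS AND PROOFS =====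

/-- Inner loop of B: the accumulator after the fold is ≤ p iff it started ≤ p
or some keyword in the table matches at this position with priority ≤ p. -/
lemma pv_inner_le_iff (cs' : List Char) (T : List (String × Nat)) (b p : Nat) :
    (T.foldl (fun b e => if e.2 < b ∧ e.1.toList.isPrefixOf cs' then e.2 else b) b) ≤ p ↔
      b ≤ p ∨ ∃ e ∈ T, e.1.toList.isPrefixOf cs' ∧ e.2 ≤ p := by
  induction T generalizing b with
  | nil => simp
  | cons e T ih =>
    simp only [List.foldl_cons, ih, List.mem_cons]
    constructor
    · rintro (h | ⟨f, hf, hpre, hle⟩)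
      · split_ifs at h with hc
        · exact Or.inr ⟨e, Or.inl rfl, hc.2, h⟩
        · exact Or.inl h
      · exact Or.inr ⟨f, Or.inr hf, hpre, hle⟩
    · rintro (h | ⟨f, (rfl | hf), hpre, hle⟩)
      · refine Or.inl ?_; split_ifs with hc
        · exact le_trans (le_of_lt hc.1) h
        · exact h
      · refine Or.inl ?_; split_ifs with hc
        · exact hle
        · rcases Nat.lt_or_ge f.2 b with h' | h'
          · exact absurd ⟨h', hpre⟩ hc
          · exact le_trans h' hle
      · exact Or.inr ⟨f, hf, hpre, hle⟩

/-- Outer loop of B over the position list. -/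
lemma pv_outer_le_iff (cs : List Char) (L : List Int) (b p : Nat) :
    (L.foldl (fun b i => pvKW.foldl
      (fun b e => if e.2 < b ∧ e.1.toList.isPrefixOf (cs.drop i.toNat) then e.2 else b) b) b) ≤ p ↔
      b ≤ p ∨ ∃ i ∈ L, ∃ e ∈ pvKW, e.1.toList.isPrefixOf (cs.drop i.toNat) ∧ e.2 ≤ p := by
  induction L generalizing b with
  | nil => simp
  | cons i L ih =>
    simp only [List.foldl_cons, ih, pv_inner_le_iff, List.mem_cons]
    constructor
    · rintro (⟨h | ⟨f, hf, hpre, hle⟩⟩ | ⟨j, hj, f, hf, hpre, hle⟩)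
      · exact Or.inl h
      · exact Or.inr ⟨i, Or.inl rfl, f, hf, hpre, hle⟩
      · exact Or.inr ⟨j, Or.inr hj, f, hf, hpre, hle⟩
    · rintro (h | ⟨j, (rfl | hj), f, hf, hpre, hle⟩)
      · exact Or.inl (Or.inl h)
      · exact Or.inl (Or.inr ⟨f, hf, hpre, hle⟩)
      · exact Or.inr ⟨j, hj, f, hf, hpre, hle⟩

/-- A nonempty keyword matches at some scanned position iff it is a substring. -/
lemma pv_bridge (cs kw : List Char) (hk : kw ≠ []) :
    (∃ i ∈ PySem.List.pyRange 0 ((cs.length : Int) + 1) 1, kw.isPrefixOf (cs.drop i.toNat)) ↔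
      PySem.Chars.isIn kw cs = true := by
  rw [← PySem.Chars.exists_prefix_drop_iff_isIn]
  constructor
  · rintro ⟨i, _, hpre⟩
    exact ⟨i.toNat, List.isPrefixOf_iff_prefix.mp hpre⟩
  · rintro ⟨j, hpre⟩
    have hj : j ≤ cs.length := by
      rcases Nat.lt_or_ge cs.length j with h | h
      · rw [List.drop_eq_nil_of_le (le_of_lt h)] at hpre
        exact absurd (List.prefix_nil.mp hpre) hk
      · exact h
    refine ⟨(j : Int), ?_, ?_⟩
    · rw [PySem.List.mem_pyRange_one]
      constructor <;> [positivity; exact_mod_cast Nat.lt_succ_of_le hj]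
    · simpa [List.isPrefixOf_iff_prefix] using hpre

-- small decidable facts about the keyword table
lemma pv_kw_ne : ∀ e ∈ pvKW, e.1.toList ≠ [] := by decide
lemma pv_kw_le0 : ∀ e ∈ pvKW, e.2 ≤ 0 →
    e.1 ∈ ["sandal", "flip", "flop", "slipper", "open toe", "chappal"] := by decide
lemma pv_kw_le1 : ∀ e ∈ pvKW, e.2 ≤ 1 →
    e.1 ∈ ["sandal", "flip", "flop", "slipper", "open toe", "chappal"] ∨ e.1 = "boot" := by decide
lemma pv_kw_le2 : ∀ e ∈ pvKW, e.2 ≤ 2 →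
    e.1 ∈ ["sandal", "flip", "flop", "slipper", "open toe", "chappal"] ∨ e.1 = "boot" ∨
    e.1 ∈ ["sneaker", "athletic", "running", "sports"] := by decide
lemma pv_kw_le3 : ∀ e ∈ pvKW, e.2 ≤ 3 →
    e.1 ∈ ["sandal", "flip", "flop", "slipper", "open toe", "chappal"] ∨ e.1 = "boot" ∨
    e.1 ∈ ["sneaker", "athletic", "running", "sports"] ∨ e.1 ∈ ["shoe", "footwear"] := by decide
lemma pv_g0_mem : ∀ k ∈ ["sandal", "flip", "flop", "slipper", "open toe", "chappal"],
    (k, 0) ∈ pvKW := by decide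
lemma pv_g2_mem : ∀ k ∈ ["sneaker", "athletic", "running", "sports"], (k, 2) ∈ pvKW := by decide
lemma pv_g3_mem : ∀ k ∈ ["shoe", "footwear"], (k, 3) ∈ pvKW := by decide

/-- Characterisation of B's scan result. -/
lemma pv_best_le_iff (cs : List Char) (p : Nat) :
    ((PySem.List.pyRange 0 ((cs.length : Int) + 1) 1).foldl (fun b i => pvKW.foldl
        (fun b e => if e.2 < b ∧ e.1.toList.isPrefixOf (cs.drop i.toNat) then e.2 else b) b) 4) ≤ p
      ↔ 4 ≤ p ∨ ∃ e ∈ pvKW, PySem.Chars.isIn e.1.toList cs = true ∧ e.2 ≤ p := by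
  rw [pv_outer_le_iff]
  constructor
  · rintro (h | ⟨i, hi, f, hf, hpre, hp⟩)
    · exact Or.inl h
    · exact Or.inr ⟨f, hf, (pv_bridge cs f.1.toList (pv_kw_ne f hf)).mp ⟨i, hi, hpre⟩, hp⟩
  · rintro (h | ⟨f, hf, hin, hp⟩)
    · exact Or.inl h
    · obtain ⟨i, hi, hpre⟩ := (pv_bridge cs f.1.toList (pv_kw_ne f hf)).mpr hin
      exact Or.inr ⟨i, hi, f, hf, hpre, hp⟩

/-- Master lemma: A's if-chain equals B's scan, for any (already normalised) string. -/
lemma pv_main (s : String) :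
    (if ["sandal", "flip", "flop", "slipper", "open toe", "chappal"].any
        (fun k => PySem.Str.isIn k s) then "sandals"
     else if PySem.Str.isIn "boot" s then "boots"
     else if ["sneaker", "athletic", "running", "sports"].any
        (fun k => PySem.Str.isIn k s) then "sneakers"
     else if ["shoe", "footwear"].any (fun k => PySem.Str.isIn k s) then "shoes"
     else "shoes")
    = pvNames.getD ((PySem.List.pyRange 0 ((s.toList.length : Int) + 1) 1).foldl
        (fun b i => pvKW.foldl
          (fun b e => if e.2 < b ∧ e.1.toList.isPrefixOf (s.toList.drop i.toNat) then e.2 else b) b)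
        4) "shoes" := by
  set best := (PySem.List.pyRange 0 ((s.toList.length : Int) + 1) 1).foldl
    (fun b i => pvKW.foldl
      (fun b e => if e.2 < b ∧ e.1.toList.isPrefixOf (s.toList.drop i.toNat) then e.2 else b) b) 4
    with hbest
  have hle : ∀ p : Nat, best ≤ p ↔ 4 ≤ p ∨
      ∃ e ∈ pvKW, PySem.Chars.isIn e.1.toList s.toList = true ∧ e.2 ≤ p :=
    fun p => hbest ▸ pv_best_le_iff s.toList p
  clear_value best
  by_cases c0 : ["sandal", "flip", "flop", "slipper", "open toe", "chappal"].any
      (fun k => PySem.Str.isIn k s) = true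
  · have h0 : best = 0 := by
      refine Nat.le_zero.mp ((hle 0).mpr (Or.inr ?_))
      obtain ⟨k, hk, hin⟩ := List.any_eq_true.mp c0
      rw [PySem.Str.isIn_eq] at hin
      exact ⟨(k, 0), pv_g0_mem k hk, hin, le_refl 0⟩
    rw [if_pos c0, h0]; rfl
  · by_cases c1 : PySem.Str.isIn "boot" s = true
    · have h1 : best ≤ 1 := by
        rw [PySem.Str.isIn_eq] at c1
        exact (hle 1).mpr (Or.inr ⟨("boot", 1), by decide, c1, le_refl 1⟩)
      have h0 : ¬ best ≤ 0 := by
        rw [hle 0]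
        rintro (h | ⟨f, hf, hin, hp⟩)
        · omega
        · exact c0 (List.any_eq_true.mpr ⟨f.1, pv_kw_le0 f hf hp,
            by rw [PySem.Str.isIn_eq]; exact hin⟩)
      have hb : best = 1 := by omega
      rw [if_neg c0, if_pos c1, hb]; rfl
    · by_cases c2 : ["sneaker", "athletic", "running", "sports"].any
          (fun k => PySem.Str.isIn k s) = true
      · have h2 : best ≤ 2 := by
          obtain ⟨k, hk, hin⟩ := List.any_eq_true.mp c2
          rw [PySem.Str.isIn_eq] at hin
          exact (hle 2).mpr (Or.inr ⟨(k, 2), pv_g2_mem k hk, hin, le_refl 2⟩)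
        have h1 : ¬ best ≤ 1 := by
          rw [hle 1]
          rintro (h | ⟨f, hf, hin, hp⟩)
          · omega
          · rcases pv_kw_le1 f hf hp with hg | hb
            · exact c0 (List.any_eq_true.mpr ⟨f.1, hg, by rw [PySem.Str.isIn_eq]; exact hin⟩)
            · exact c1 (by rw [PySem.Str.isIn_eq, ← hb]; exact hin)
        have hb : best = 2 := by omega
        rw [if_neg c0, if_neg c1, if_pos c2, hb]; rfl
      · by_cases c3 : ["shoe", "footwear"].any (fun k => PySem.Str.isIn k s) = true
        · have h3 : best ≤ 3 := by
            obtain ⟨k, hk, hin⟩ := List.any_eq_true.mp c3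
            rw [PySem.Str.isIn_eq] at hin
            exact (hle 3).mpr (Or.inr ⟨(k, 3), pv_g3_mem k hk, hin, le_refl 3⟩)
          have h2 : ¬ best ≤ 2 := by
            rw [hle 2]
            rintro (h | ⟨f, hf, hin, hp⟩)
            · omega
            · rcases pv_kw_le2 f hf hp with hg | hb | hg
              · exact c0 (List.any_eq_true.mpr ⟨f.1, hg, by rw [PySem.Str.isIn_eq]; exact hin⟩)
              · exact c1 (by rw [PySem.Str.isIn_eq, ← hb]; exact hin)
              · exact c2 (List.any_eq_true.mpr ⟨f.1, hg, by rw [PySem.Str.isIn_eq]; exact hin⟩)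
          have hb : best = 3 := by omega
          rw [if_neg c0, if_neg c1, if_neg c2, if_pos c3, hb]; rfl
        · have h4 : best ≤ 4 := (hle 4).mpr (Or.inl le_rfl)
          have h3 : ¬ best ≤ 3 := by
            rw [hle 3]
            rintro (h | ⟨f, hf, hin, hp⟩)
            · omega
            · rcases pv_kw_le3 f hf hp with hg | hb | hg | hg
              · exact c0 (List.any_eq_true.mpr ⟨f.1, hg, by rw [PySem.Str.isIn_eq]; exact hin⟩)
              · exact c1 (by rw [PySem.Str.isIn_eq, ← hb]; exact hin)
              · exact c2 (List.any_eq_true.mpr ⟨f.1, hg, by rw [PySem.Str.isIn_eq]; exact hin⟩)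
              · exact c3 (List.any_eq_true.mpr ⟨f.1, hg, by rw [PySem.Str.isIn_eq]; exact hin⟩)
          have hb : best = 4 := by omega
          rw [if_neg c0, if_neg c1, if_neg c2, if_neg c3, hb]; rfl

-- ===== VERDICT (by name: the statement is the Claim_ definition above) =====
theorem canonicalize_detected_shoe_label_spec : Claim_equal_canonicalize_detected_shoe_label := by
  intro label _
  unfold Spec_canonicalize_detected_shoe_label canonicalize_detected_shoe_label
    canonicalize_detected_shoe_label_alt
  exact pv_main (PySem.Str.lower (PySem.Str.strip label))
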